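-- pv_equiv track=rewrite | github.com/ujjagr/Bookstore-Automation-System | BAS/bookstore/views.py | cleaner
-- ===== SOURCE A (Python) =====
-- def cleaner(query):
--     metacharacters = [
--         "^",  # Matches the beginning of the string
--         "$",  # Matches the end of the string
--         "*",  # Matches zero or more repetitions of the preceding character
--         "+",  # Matches one or more repetitions of the preceding character
--         "?",  # Matches zero or one occurrence of the preceding character
--         "|",  # Alternation (either or)
--         "[",  # Character class (start of a set of characters)
--         "]",  # Character class (end of a set of characters)
--         "\\",  # Escape character (to use a metacharacter literally)
--         "{",  # Quantifier (start of a repetition specification)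
--         "}",  # Quantifier (end of a repetition specification)
--         "(",  # Capturing group (start)
--         ")",  # Capturing group (end)
--         "^",  # Inside character class for negation (e.g., [^a-z])
--         "-",  # Inside character class for range (e.g., [a-z])
--     ]
--     query1 = ""
--     for i in query:
--         if i in metacharacters:
--             if i == "\\":
--                 query1+="\\\\"
--             elif i == '^':
--                 query1+= '\^'
--             else:
--                 query1 += '['+i+']'
--         else:
--             query1 += i
--     return query1
-- ===== SOURCE B (Python) =====
-- _META = '^$*+?|[]\\{}()-'
--
--
-- def cleaner(query):
--     # chunked scan: copy maximal metacharacter-free runs wholesale as slices,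
--     # emit the replacement for each metacharacter in between, join at the end
--     out = []
--     i = 0
--     n = len(query)
--     while i < n:
--         j = i
--         while j < n and query[j] not in _META:
--             j += 1
--         out.append(query[i:j])
--         if j < n:
--             c = query[j]
--             out.append('\\\\' if c == '\\' else '\\^' if c == '^' else '[' + c + ']')
--             j += 1
--         i = j
--     return ''.join(out)
-- ===== Notes on version B (the rewrite author's own statement) =====
-- stated objective: faster
-- what changed: Replaces A's per-character accumulate-and-branch loop by a chunked two-pointer scan that copies maximal metacharacter-free runs as whole slices, emits one replacement per metacharacter, and joins the chunks at the end.
import Mathlib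
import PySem

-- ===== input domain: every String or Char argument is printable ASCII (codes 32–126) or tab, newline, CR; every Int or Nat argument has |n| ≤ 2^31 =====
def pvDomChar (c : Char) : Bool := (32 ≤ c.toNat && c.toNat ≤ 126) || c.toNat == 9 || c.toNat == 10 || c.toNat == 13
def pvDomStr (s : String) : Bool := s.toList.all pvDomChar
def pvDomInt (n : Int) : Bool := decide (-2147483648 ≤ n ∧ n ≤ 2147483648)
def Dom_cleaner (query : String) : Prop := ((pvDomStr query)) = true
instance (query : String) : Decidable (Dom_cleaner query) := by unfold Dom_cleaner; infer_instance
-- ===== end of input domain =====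

-- B replaces A's per-character accumulate-and-branch loop by a chunked scan that copies
-- maximal metacharacter-free runs wholesale and joins the chunks (alternative decomposition).

-- ===== PORT A =====
def cleanerMeta : List Char :=
  ['^', '$', '*', '+', '?', '|', '[', ']', '\\', '{', '}', '(', ')', '^', '-']

def cleaner (query : String) : String :=
  String.mk (query.toList.foldl (fun query1 i =>
    if cleanerMeta.contains i then
      if i = '\\' then query1 ++ ['\\', '\\']
      else if i = '^' then query1 ++ ['\\', '^']
      else query1 ++ ['[', i, ']']
    else query1 ++ [i]) [])

-- ===== PORT B =====
-- Source B's _META string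
def cleanerMetaB : List Char := "^$*+?|[]\\{}()-".toList

-- the replacement Source B emits for a metacharacter
def cleanerRepl (c : Char) : List Char :=
  if c = '\\' then ['\\', '\\']
  else if c = '^' then ['\\', '^']
  else ['[', c, ']']

-- Source B's chunked scan: the inner `while j < n and query[j] not in _META` advance is
-- takeWhile/dropWhile on the remaining characters; each outer iteration appends the
-- clean run as one chunk plus one replacement chunk, recursing on the rest.
def cleanerScan (l : List Char) : List (List Char) :=
  match _h : l.dropWhile (fun c => !cleanerMetaB.contains c) with
  | [] => [l.takeWhile (fun c => !cleanerMetaB.contains c)]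
  | c :: rs =>
      l.takeWhile (fun c => !cleanerMetaB.contains c) :: cleanerRepl c :: cleanerScan rs
termination_by l.length
decreasing_by
  have h1 : (l.dropWhile (fun c => !cleanerMetaB.contains c)).length ≤ l.length :=
    l.length_dropWhile_le _
  rw [_h] at h1; simp at h1; omega

def cleaner_alt (query : String) : String :=
  String.mk (cleanerScan query.toList).flatten

-- ===== PRECONDITION & SPEC =====
def Spec_cleaner (query : String) (out : String) : Prop := out = cleaner_alt query
instance (query : String) (out : String) : Decidable (Spec_cleaner query out) := by unfold Spec_cleaner; infer_instance

-- ===== CLAIM =====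
def Claim_equal_cleaner : Prop := ∀ (query : String), Dom_cleaner query → Spec_cleaner query (cleaner query)

-- ===== LEMMAS AND PROOFS =====

-- the per-character replacement A performs
def cleanerStep (i : Char) : List Char :=
  if cleanerMeta.contains i then
    if i = '\\' then ['\\', '\\']
    else if i = '^' then ['\\', '^']
    else ['[', i, ']']
  else [i]

lemma cleanerMetaB_eq_contains (c : Char) :
    cleanerMetaB.contains c = cleanerMeta.contains c := by
  have h : cleanerMetaB = ['^', '$', '*', '+', '?', '|', '[', ']', '\\', '{', '}', '(', ')', '-'] := by
    decide
  rw [h, List.contains_eq_mem, List.contains_eq_mem, cleanerMeta]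
  simp only [List.mem_cons, List.not_mem_nil]
  by_cases hc : c = '^' <;> simp [hc]

lemma cleanerStep_not_meta {c : Char} (h : cleanerMeta.contains c = false) :
    cleanerStep c = [c] := by simp only [cleanerStep, h, Bool.false_eq_true, if_false]

lemma cleanerStep_meta {c : Char} (h : cleanerMeta.contains c = true) :
    cleanerStep c = cleanerRepl c := by simp only [cleanerStep, cleanerRepl, h, if_true]

lemma dropWhile_head_false {p : Char → Bool} :
    ∀ {l : List Char} {c : Char} {rs : List Char}, l.dropWhile p = c :: rs → p c = false := by
  intro l; induction l with
  | nil => intro c rs h; simp [List.dropWhile] at h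
  | cons a t ih =>
    intro c rs h
    by_cases hp : p a = true
    · rw [List.dropWhile_cons_of_pos hp] at h; exact ih h
    · rw [List.dropWhile_cons_of_neg hp] at h
      cases h; simpa using hp

lemma cleanerScan_flatten : ∀ (l : List Char),
    (cleanerScan l).flatten = l.flatMap cleanerStep := by
  intro l
  induction hn : l.length using Nat.strong_induction_on generalizing l with
  | _ n ih =>
  subst hn
  unfold cleanerScan
  have hsplit := (List.takeWhile_append_dropWhile (p := fun c => !cleanerMetaB.contains c) (l := l)).symm
  have htake : (l.takeWhile (fun c => !cleanerMetaB.contains c)).flatMap cleanerStep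
      = l.takeWhile (fun c => !cleanerMetaB.contains c) := by
    have hcong : ∀ c ∈ l.takeWhile (fun c => !cleanerMetaB.contains c),
        cleanerStep c = [c] := by
      intro c hc
      have h1 := List.mem_takeWhile_imp hc
      have h2 : cleanerMeta.contains c = false := by
        rw [← cleanerMetaB_eq_contains]; simpa using h1
      exact cleanerStep_not_meta h2
    rw [List.flatMap_congr hcong, List.flatMap_singleton']
  split
  · next h =>
    simp only [List.flatten]
    conv_rhs => rw [hsplit, h]
    simpa using htake.symm
  · next c rs h =>
    have hc : cleanerMeta.contains c = true := by
      rw [← cleanerMetaB_eq_contains]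
      have := dropWhile_head_false h
      simpa using this
    have hlen : rs.length < l.length := by
      have h1 : (l.dropWhile (fun c => !cleanerMetaB.contains c)).length ≤ l.length :=
        l.length_dropWhile_le _
      rw [h] at h1; simp at h1; omega
    have hrec := ih rs.length hlen rs rfl
    simp only [List.flatten_cons]
    conv_rhs => rw [hsplit, h]
    rw [List.flatMap_append, htake, List.flatMap_cons, hrec, cleanerStep_meta hc]

-- ===== VERDICT =====
theorem cleaner_spec : Claim_equal_cleaner := by
  intro query _
  show cleaner query = cleaner_alt query
  unfold cleaner cleaner_alt
  have hbody : (fun (query1 : List Char) (i : Char) =>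
      if cleanerMeta.contains i then
        if i = '\\' then query1 ++ ['\\', '\\']
        else if i = '^' then query1 ++ ['\\', '^']
        else query1 ++ ['[', i, ']']
      else query1 ++ [i]) = fun query1 i => query1 ++ cleanerStep i := by
    funext query1 i
    unfold cleanerStep
    split_ifs <;> rfl
  rw [hbody, PySem.List.foldl_append_eq_flatMap, cleanerScan_flatten]
  simp
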